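-- pv_equiv track=rewrite | github.com/abdulrahmannadap/airflow-ai-agent | agent/error_classifier.py | extract_log_snippet
-- ===== SOURCE A (Python) =====
-- def extract_log_snippet(log_text: str, max_lines: int = 30) -> str:
--     """Extract the most relevant lines from a large log"""
--     lines = log_text.split("\n")
--     error_lines = []
--     for i, line in enumerate(lines):
--         if any(kw in line.upper() for kw in ["ERROR", "EXCEPTION", "FAILED", "CRITICAL", "FATAL"]):
--             # Include 2 lines before and after for context
--             start = max(0, i - 2)
--             end = min(len(lines), i + 3)
--             error_lines.extend(lines[start:end])
--
--     if not error_lines: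
--         # Fall back to last N lines
--         error_lines = lines[-max_lines:]
--
--     seen = set()
--     unique = []
--     for line in error_lines:
--         if line not in seen:
--             seen.add(line)
--             unique.append(line)
--
--     return "\n".join(unique[-max_lines:])
-- ===== SOURCE B (Python) =====
-- def extract_log_snippet(log_text: str, max_lines: int = 30) -> str:
--     """Extract the most relevant lines from a large log"""
--     lines = log_text.split("\n")
--     n = len(lines)
--     flags = [any(kw in line.upper() for kw in ("ERROR", "EXCEPTION", "FAILED", "CRITICAL", "FATAL"))
--              for line in lines]
--     # a line is selected iff some line within distance 2 of it matched a keyword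
--     selected = [lines[j] for j in range(n) if any(flags[max(0, j - 2):j + 3])]
--     if not selected:
--         selected = lines[-max_lines:]
--     unique = list(dict.fromkeys(selected))
--     return "\n".join(unique[-max_lines:])
-- ===== Notes on version B (the rewrite author's own statement) =====
-- stated objective: alternative
-- what changed: A extends a list with an overlapping 5-line context slice per matching line and then deduplicates; B precomputes keyword flags and, in one filtered pass over the indices, emits each line whose index is within 2 of a flagged line exactly once (in ascending index order), keeping only the content dedup.
import Mathlib
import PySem

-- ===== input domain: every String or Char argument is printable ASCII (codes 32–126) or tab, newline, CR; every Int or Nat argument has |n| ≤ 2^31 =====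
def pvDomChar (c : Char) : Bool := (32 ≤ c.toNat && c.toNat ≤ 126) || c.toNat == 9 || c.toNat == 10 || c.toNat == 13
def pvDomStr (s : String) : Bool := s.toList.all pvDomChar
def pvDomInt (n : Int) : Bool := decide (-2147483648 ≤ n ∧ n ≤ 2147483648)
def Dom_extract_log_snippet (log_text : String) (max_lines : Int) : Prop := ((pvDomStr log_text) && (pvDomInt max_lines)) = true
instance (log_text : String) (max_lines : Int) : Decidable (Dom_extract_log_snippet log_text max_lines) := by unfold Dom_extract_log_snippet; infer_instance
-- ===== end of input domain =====

-- B replaces A's quadratic-feeling "extend a list with every context slice, then dedup" by marking, in one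
-- pass, which line indices are within 2 of a keyword line and emitting each selected line once in index
-- order (objective: alternative — same observable result, no repeated context slices).

-- helper shared by both ports: the keyword test `any(kw in line.upper() for kw in [...])`,
-- the identical expression in both Python sources
def pvMatch (line : List Char) : Bool :=
  ["ERROR".toList, "EXCEPTION".toList, "FAILED".toList, "CRITICAL".toList, "FATAL".toList].any
    (fun kw => PySem.Chars.isIn kw (PySem.Chars.upper line))

-- ===== PORT A =====
def extract_log_snippet (log_text : String) (max_lines : Int) : String :=
  let lines := PySem.Chars.splitOn log_text.toList "\n".toList
  let error_lines := (PySem.List.enumerate lines 0).foldl (fun acc p =>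
      if pvMatch p.2 then
        acc ++ PySem.List.slice lines (some (max 0 (p.1 - 2))) (some (min (PySem.List.len lines) (p.1 + 3)))
      else acc) []
  let error_lines := if error_lines = [] then PySem.List.slice lines (some (- max_lines)) none else error_lines
  let fin := error_lines.foldl (fun (st : PySem.Set (List Char) × List (List Char)) line =>
      if PySem.Set.contains st.1 line then st
      else (PySem.Set.add st.1 line, st.2 ++ [line])) (PySem.Set.empty, [])
  String.ofList (PySem.Chars.join "\n".toList (PySem.List.slice fin.2 (some (- max_lines)) none))

-- ===== PORT B =====
def extract_log_snippet_alt (log_text : String) (max_lines : Int) : String :=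
  let lines := PySem.Chars.splitOn log_text.toList "\n".toList
  let n := PySem.List.len lines
  let flags := lines.map pvMatch
  let selected := ((PySem.List.pyRange 0 n 1).filter (fun j =>
      (PySem.List.slice flags (some (max 0 (j - 2))) (some (j + 3))).any id)).map
      (fun j => PySem.List.pyGetD lines j [])
  let selected := if selected = [] then PySem.List.slice lines (some (- max_lines)) none else selected
  String.ofList (PySem.Chars.join "\n".toList (PySem.List.slice (PySem.List.dedup selected) (some (- max_lines)) none))

-- ===== PRECONDITION & SPEC =====
def Spec_extract_log_snippet (log_text : String) (max_lines : Int) (out : String) : Prop := out = extract_log_snippet_alt log_text max_lines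
instance (log_text : String) (max_lines : Int) (out : String) : Decidable (Spec_extract_log_snippet log_text max_lines out) := by unfold Spec_extract_log_snippet; infer_instance

-- ===== CLAIM (what is proved, stated in full; the proofs are below) =====
def Claim_equal_extract_log_snippet : Prop := ∀ (log_text : String) (max_lines : Int), Dom_extract_log_snippet log_text max_lines → Spec_extract_log_snippet log_text max_lines (extract_log_snippet log_text max_lines)

-- ===== LEMMAS AND PROOFS =====
def pvDD {α : Type} [DecidableEq α] (seen : List α) : List α → List α
  | [] => []
  | x :: xs => if x ∈ seen then pvDD seen xs else x :: pvDD (x :: seen) xs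


theorem pvDD_cons_mem {α : Type} [DecidableEq α] {seen : List α} {x : α} (xs : List α)
    (h : x ∈ seen) : pvDD seen (x :: xs) = pvDD seen xs := by simp [pvDD, h]

theorem pvDD_cons_not_mem {α : Type} [DecidableEq α] {seen : List α} {x : α} (xs : List α)
    (h : x ∉ seen) : pvDD seen (x :: xs) = x :: pvDD (x :: seen) xs := by simp [pvDD, h]

theorem pvPairFold {α : Type} [BEq α] (l : List α) (s : PySem.Set α) :
    l.foldl (fun (st : PySem.Set α × List α) line =>
      if PySem.Set.contains st.1 line then st
      else (PySem.Set.add st.1 line, st.2 ++ [line])) (s, s)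
    = (l.foldl PySem.Set.add s, l.foldl PySem.Set.add s) := by
  induction l generalizing s with
  | nil => rfl
  | cons x xs ih =>
    simp only [List.foldl_cons]
    by_cases h : PySem.Set.contains s x = true
    · rw [if_pos h, show PySem.Set.add s x = s from by simp only [PySem.Set.add]; rw [if_pos h], ih s]
    · rw [if_neg h, show PySem.Set.add s x = s ++ [x] from by simp only [PySem.Set.add]; rw [if_neg h], ih (s ++ [x])]

theorem pvDD_congr {α : Type} [DecidableEq α] (l : List α) {s t : List α}
    (h : ∀ y, y ∈ s ↔ y ∈ t) : pvDD s l = pvDD t l := by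
  induction l generalizing s t with
  | nil => rfl
  | cons x xs ih =>
    by_cases hx : x ∈ s
    · rw [pvDD_cons_mem xs hx, pvDD_cons_mem xs ((h x).mp hx), ih h]
    · rw [pvDD_cons_not_mem xs hx, pvDD_cons_not_mem xs (fun hc => hx ((h x).mpr hc)),
        ih (s := x :: s) (t := x :: t) (fun y => by simp [h y])]

theorem pvFoldlAdd_eq_pvDD {α : Type} [BEq α] [LawfulBEq α] [DecidableEq α]
    (l : List α) (s : List α) : l.foldl PySem.Set.add s = s ++ pvDD s l := by
  induction l generalizing s with
  | nil => simp [pvDD]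
  | cons x xs ih =>
    simp only [List.foldl_cons, pvDD]
    by_cases hx : x ∈ s
    · rw [if_pos hx, PySem.Set.add_of_mem hx, ih]
    · rw [if_neg hx, PySem.Set.add_of_not_mem hx, ih,
        pvDD_congr xs (s := x :: s) (t := s ++ [x]) (by intro y; simp; tauto)]
      simp

theorem pvDedup_eq_pvDD {α : Type} [BEq α] [LawfulBEq α] [DecidableEq α] (l : List α) :
    PySem.List.dedup l = pvDD [] l := by
  rw [PySem.List.dedup_eq_ofList, PySem.Set.ofList_eq_foldl]
  simpa using pvFoldlAdd_eq_pvDD l []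

theorem pvDD_ne_nil {α : Type} [DecidableEq α] (x : α) (xs : List α) :
    pvDD [] (x :: xs) ≠ [] := by
  simp [pvDD]

theorem pvDD_append_mem {α : Type} [DecidableEq α] (l1 l2 seen : List α)
    (h : ∀ x ∈ l1, x ∈ seen) : pvDD seen (l1 ++ l2) = pvDD seen l2 := by
  induction l1 with
  | nil => rfl
  | cons x xs ih =>
    simp only [List.cons_append, pvDD, if_pos (h x (by simp))]
    exact ih (fun y hy => h y (by simp [hy]))

theorem pvDD_append_new {α : Type} [DecidableEq α] (l1 l2 seen : List α)
    (hn : l1.Nodup) (h : ∀ x ∈ l1, x ∉ seen) :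
    pvDD seen (l1 ++ l2) = l1 ++ pvDD (l1 ++ seen) l2 := by
  induction l1 generalizing seen with
  | nil => rfl
  | cons x xs ih =>
    simp only [List.cons_append, pvDD, if_neg (h x (by simp))]
    rw [ih (x :: seen) hn.of_cons (fun y hy => by
      simp only [List.mem_cons, not_or]
      exact ⟨fun he => (List.nodup_cons.mp hn).1 (he ▸ hy), h y (by simp [hy])⟩)]
    rw [pvDD_congr l2 (s := xs ++ x :: seen) (t := (x :: xs) ++ seen) (by intro y; simp; tauto)]
    simp

theorem pvDD_map {α β : Type} [DecidableEq α] [DecidableEq β]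
    (l : List α) (f : α → β) (seenI : List α) (seenC : List β)
    (h : ∀ x ∈ seenI, f x ∈ seenC) :
    pvDD seenC (l.map f) = pvDD seenC ((pvDD seenI l).map f) := by
  induction l generalizing seenI seenC with
  | nil => rfl
  | cons x xs ih =>
    by_cases hx : x ∈ seenI
    · rw [List.map_cons, pvDD_cons_mem _ (h x hx), pvDD_cons_mem _ hx, ih seenI seenC h]
    · rw [List.map_cons, pvDD_cons_not_mem _ hx, List.map_cons]
      by_cases hf : f x ∈ seenC
      · rw [pvDD_cons_mem _ hf, pvDD_cons_mem _ hf, ih (x :: seenI) seenC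
          (fun y hy => by rcases List.mem_cons.mp hy with rfl | hy; exacts [hf, h y hy])]
      · rw [pvDD_cons_not_mem _ hf, pvDD_cons_not_mem _ hf, ih (x :: seenI) (f x :: seenC)
          (fun y hy => by
            rcases List.mem_cons.mp hy with rfl | hy
            · simp
            · exact List.mem_cons_of_mem _ (h y hy))]

def pvWin (n i : Nat) : List Nat := List.range' (i - 2) (min n (i + 3) - (i - 2))
def pvNear (n : Nat) (ms : List Nat) (j : Nat) : Bool := ms.any (fun i => decide (j ∈ pvWin n i))

theorem pvMem_win {n i j : Nat} : j ∈ pvWin n i ↔ i - 2 ≤ j ∧ j < min n (i + 3) := by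
  unfold pvWin
  rw [List.mem_range'_1]
  omega

theorem pvSelf_mem_win {n m : Nat} (h : m < n) : m ∈ pvWin n m := by
  rw [pvMem_win]; omega

theorem pvMain (n : Nat) (ms : List Nat) (E : Nat) (seen : List Nat)
    (hp : ms.Pairwise (· < ·)) (hlt : ∀ m ∈ ms, m < n) (hE : E ≤ n)
    (h1 : ∀ x ∈ seen, x < E)
    (h2 : ∀ m ∈ ms, ∀ x, m - 2 ≤ x → x < E → x ∈ seen)
    (h3 : ∀ m ∈ ms, E ≤ m + 3) :
    pvDD seen (ms.flatMap (pvWin n)) = (List.range' E (n - E)).filter (pvNear n ms) := by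
  induction ms generalizing E seen with
  | nil =>
    simp [pvDD, pvNear]
  | cons m ms ih =>
    have hm : m < n := hlt m (by simp)
    have hEm : E ≤ min n (m + 3) := le_min hE (h3 m (by simp))
    set s : Nat := m - 2 with hs
    set e : Nat := min n (m + 3) with he
    set s' : Nat := max s E with hs'
    have hse : s ≤ e := by omega
    have hs'e : s' ≤ e := by omega
    -- split the window at s'
    have hwin : pvWin n m = List.range' s (s' - s) ++ List.range' s' (e - s') := by
      have h0 := List.range'_append_1 (s := s) (m := s' - s) (n := e - s')
      rw [show s + (s' - s) = s' from by omega] at h0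
      rw [pvWin, ← hs, ← he, show e - s = s' - s + (e - s') from by omega]
      exact h0.symm
    rw [List.flatMap_cons, hwin, List.append_assoc]
    rw [pvDD_append_mem _ _ _ (fun x hx => by
      rw [List.mem_range'_1] at hx
      exact h2 m (by simp) x (by omega) (by omega))]
    rw [pvDD_append_new _ _ _ (List.nodup_range' ) (fun x hx hxs => by
      rw [List.mem_range'_1] at hx
      exact absurd (h1 x hxs) (by omega))]
    rw [ih (E := e) (seen := List.range' s' (e - s') ++ seen) hp.of_cons
      (fun m' hm' => hlt m' (by simp [hm']))
      (by omega)
      (fun x hx => by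
        rcases List.mem_append.mp hx with hx | hx
        · rw [List.mem_range'_1] at hx; omega
        · have := h1 x hx; omega)
      (fun m' hm' x hxs hxe => by
        have hmm' : m < m' := (List.pairwise_cons.mp hp).1 m' hm'
        by_cases hxE : x < E
        · exact List.mem_append.mpr (Or.inr (h2 m' (by simp [hm']) x hxs hxE))
        · exact List.mem_append.mpr (Or.inl (by rw [List.mem_range'_1]; omega)))
      (fun m' hm' => by
        have hmm' : m < m' := (List.pairwise_cons.mp hp).1 m' hm'
        omega)]
    -- now the RHS side
    have hsplit : List.range' E (n - E) = List.range' E (e - E) ++ List.range' e (n - e) := by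
      have h0 := List.range'_append_1 (s := E) (m := e - E) (n := n - e)
      rw [show E + (e - E) = e from by omega] at h0
      rw [show n - E = (e - E) + (n - e) from by omega]
      exact h0.symm
    rw [hsplit, List.filter_append]
    congr 1
    · -- (range' E (e-E)).filter (near (m::ms)) = range' s' (e - s')
      have : List.range' E (e - E) = List.range' E (s' - E) ++ List.range' s' (e - s') := by
        have h0 := List.range'_append_1 (s := E) (m := s' - E) (n := e - s')
        rw [show E + (s' - E) = s' from by omega] at h0
        rw [show e - E = (s' - E) + (e - s') from by omega]
        exact h0.symm
      rw [this, List.filter_append]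
      have hlo : (List.range' E (s' - E)).filter (pvNear n (m :: ms)) = [] := by
        rw [List.filter_eq_nil_iff]
        intro j hj
        rw [List.mem_range'_1] at hj
        simp only [pvNear, List.any_eq_true, decide_eq_true_eq, not_exists]
        rintro i ⟨hi, hji⟩
        rw [pvMem_win] at hji
        rcases List.mem_cons.mp hi with rfl | hi
        · omega
        · have : m < i := (List.pairwise_cons.mp hp).1 i hi
          omega
      have hhi : (List.range' s' (e - s')).filter (pvNear n (m :: ms)) = List.range' s' (e - s') := by
        rw [List.filter_eq_self]
        intro j hj
        rw [List.mem_range'_1] at hj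
        simp only [pvNear, List.any_eq_true, decide_eq_true_eq]
        exact ⟨m, by simp, pvMem_win.mpr (by omega)⟩
      rw [hlo, hhi, List.nil_append]
    · -- (range' e (n-e)).filter (near (m::ms)) = same filter near ms
      apply List.filter_congr
      intro j hj
      rw [List.mem_range'_1] at hj
      simp only [pvNear, List.any_cons]
      have : ¬ (j ∈ pvWin n m) := by rw [pvMem_win]; omega
      simp [this]

theorem pvRangeMap {α : Type} (l : List α) (a k : Nat) (d : α) (h : a + k ≤ l.length) :
    (List.range' a k).map (fun j => l.getD j d) = (l.drop a).take k := by
  apply List.ext_getElem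
  · simp
    omega
  · intro i h1 h2
    have hik : i < k := by simpa using h1
    have hia : a + i < l.length := by omega
    simp only [List.getElem_map, List.getElem_range', List.getElem_take, List.getElem_drop]
    rw [List.getD_eq_getElem _ _ (by simpa using hia)]
    congr 1
    omega

theorem pvFlatMap_congr {α β : Type} (l : List α) (f g : α → List β)
    (h : ∀ x ∈ l, f x = g x) : l.flatMap f = l.flatMap g := by
  induction l with
  | nil => rfl
  | cons x xs ih =>
    rw [List.flatMap_cons, List.flatMap_cons, h x (by simp), ih (fun y hy => h y (by simp [hy]))]

theorem pvSliceWin (l : List (List Char)) (k : Nat) (hk : k < l.length) :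
    PySem.List.slice l (some (max 0 ((k : Int) - 2))) (some (min (PySem.List.len l) ((k : Int) + 3)))
      = (pvWin l.length k).map (fun j => l.getD j []) := by
  have h1 : (max 0 ((k : Int) - 2)) = (((k - 2 : Nat)) : Int) := by omega
  have h2 : (min (PySem.List.len l) ((k : Int) + 3)) = ((min l.length (k + 3) : Nat) : Int) := by
    rw [PySem.List.len_eq]; omega
  rw [h1, h2, PySem.List.slice_natCast, pvWin, pvRangeMap _ _ _ _ (by omega)]

theorem pvA_lines (l : List (List Char)) :
    (PySem.List.enumerate l 0).foldl (fun acc p =>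
      if pvMatch p.2 then
        acc ++ PySem.List.slice l (some (max 0 (p.1 - 2))) (some (min (PySem.List.len l) (p.1 + 3)))
      else acc) []
    = ((((List.range l.length).filter (fun k => pvMatch (l.getD k []))).flatMap (pvWin l.length)).map
        (fun j => l.getD j [])) := by
  rw [PySem.List.foldl_if_eq_foldl_filter, PySem.List.foldl_append_eq_flatMap]
  rw [PySem.List.enumerate_eq_map_pyRange l [], PySem.List.len_eq, PySem.List.pyRange_zero_natCast]
  rw [List.map_map, List.filter_map, List.flatMap_map]
  simp only [List.nil_append, Function.comp_def, PySem.List.pyGetD_natCast]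
  rw [List.map_flatMap]
  apply pvFlatMap_congr
  intro k hk
  rw [List.mem_filter, List.mem_range] at hk
  exact pvSliceWin l k hk.1

theorem pvB_lines (l : List (List Char)) :
    ((PySem.List.pyRange 0 (PySem.List.len l) 1).filter (fun j =>
      (PySem.List.slice (l.map pvMatch) (some (max 0 (j - 2))) (some (j + 3))).any id)).map
      (fun j => PySem.List.pyGetD l j [])
    = (((List.range l.length).filter (pvNear l.length ((List.range l.length).filter (fun k => pvMatch (l.getD k []))))).map
        (fun j => l.getD j [])) := by
  rw [PySem.List.len_eq, PySem.List.pyRange_zero_natCast, List.filter_map, List.map_map]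
  simp only [Function.comp_def, PySem.List.pyGetD_natCast]
  have hfc : ∀ k ∈ List.range l.length,
      ((PySem.List.slice (l.map pvMatch) (some (max 0 ((k : Int) - 2))) (some ((k : Int) + 3))).any id)
      = pvNear l.length ((List.range l.length).filter (fun k => pvMatch (l.getD k []))) k := by
    intro k hk
    rw [List.mem_range] at hk
    have h1 : (max 0 ((k : Int) - 2)) = (((k - 2 : Nat)) : Int) := by omega
    have h2 : ((k : Int) + 3) = (((k + 3 : Nat)) : Int) := by omega
    rw [h1, h2, PySem.List.slice_natCast]
    have h3 : ((l.map pvMatch).drop (k - 2)).take ((k + 3) - (k - 2))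
        = ((l.map pvMatch).drop (k - 2)).take (min l.length (k + 3) - (k - 2)) := by
      apply List.take_eq_take_iff.mpr
      simp
      omega
    rw [h3, ← pvRangeMap (l.map pvMatch) (k - 2) (min l.length (k + 3) - (k - 2)) false (by simp; omega)]
    rw [List.any_map]
    have hgd : ∀ j ∈ List.range' (k - 2) (min l.length (k + 3) - (k - 2)),
        (id ∘ fun j => (l.map pvMatch).getD j false) j = pvMatch (l.getD j []) := by
      intro j hj
      rw [List.mem_range'_1] at hj
      have hjl : j < l.length := by omega
      simp only [Function.comp_def, id]
      rw [List.getD_eq_getElem _ _ (by simpa using hjl), List.getD_eq_getElem _ _ hjl, List.getElem_map]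
    rw [PySem.List.any_congr_mem hgd]
    rcases Bool.eq_false_or_eq_true (pvNear l.length ((List.range l.length).filter (fun k => pvMatch (l.getD k []))) k) with hb | hb
    all_goals rw [hb]
    · rw [List.any_eq_true]
      simp only [pvNear, List.any_eq_true, decide_eq_true_eq, List.mem_filter, List.mem_range] at hb
      obtain ⟨i, ⟨hin, hif⟩, hiw⟩ := hb
      rw [pvMem_win] at hiw
      exact ⟨i, by rw [List.mem_range'_1]; omega, hif⟩
    · rw [List.any_eq_false]
      simp only [pvNear, List.any_eq_false, decide_eq_true_eq, List.mem_filter, List.mem_range] at hb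
      intro j hj
      rw [List.mem_range'_1] at hj
      intro hmj
      exact hb j ⟨by omega, hmj⟩ (pvMem_win.mpr (by omega))
  rw [List.filter_congr hfc]

-- ===== VERDICT (by name: the statement is the Claim_ definition above) =====
theorem extract_log_snippet_spec : Claim_equal_extract_log_snippet := by
  intro log_text max_lines _
  unfold Spec_extract_log_snippet extract_log_snippet extract_log_snippet_alt
  dsimp only
  rw [show ((PySem.Set.empty : PySem.Set (List Char)), ([] : List (List Char)))
      = (([] : List (List Char)), ([] : List (List Char))) from rfl]
  rw [pvPairFold, pvFoldlAdd_eq_pvDD, pvDedup_eq_pvDD, List.nil_append]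
  rw [pvA_lines, pvB_lines]
  set l := PySem.Chars.splitOn log_text.toList "\n".toList with hl
  set n := l.length with hn
  set ms := (List.range n).filter (fun k => pvMatch (l.getD k [])) with hms
  have hkey : pvDD [] (ms.flatMap (pvWin n)) = (List.range n).filter (pvNear n ms) := by
    have h := pvMain n ms 0 []
      ((List.pairwise_lt_range).filter _)
      (fun m hm => List.mem_range.mp (List.mem_filter.mp hm).1)
      (Nat.zero_le n)
      (by intro x hx; cases hx)
      (by intro m _ x _ hx; omega)
      (by intro m _; omega)
    simpa [List.range_eq_range'] using h
  have hcase : ms = [] ∨ ms ≠ [] := em _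
  rcases hcase with hms0 | hms0
  · rw [hms0]
    simp only [List.flatMap_nil, List.map_nil]
    have : (List.filter (pvNear n []) (List.range n)) = [] := by
      apply List.filter_eq_nil_iff.mpr
      intro j _
      simp [pvNear]
    rw [this]
    simp only [List.map_nil]
  · obtain ⟨m, ms', hmm⟩ := List.exists_cons_of_ne_nil hms0
    have hmn : m < n := by
      have : m ∈ ms := by rw [hmm]; simp
      exact List.mem_range.mp (List.mem_filter.mp this).1
    have hAne : (ms.flatMap (pvWin n)).map (fun j => l.getD j ([] : List Char)) ≠ [] := by
      simp only [ne_eq, List.map_eq_nil_iff]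
      intro hfm
      have : m ∈ ms.flatMap (pvWin n) := by
        rw [List.mem_flatMap]
        exact ⟨m, by rw [hmm]; simp, pvSelf_mem_win hmn⟩
      rw [hfm] at this
      cases this
    have hBne : ((List.range n).filter (pvNear n ms)).map (fun j => l.getD j ([] : List Char)) ≠ [] := by
      rw [← hkey]
      obtain ⟨y, ys, hys⟩ := List.exists_cons_of_ne_nil
        (show ms.flatMap (pvWin n) ≠ [] from fun hfm => hAne (by rw [hfm]; rfl))
      rw [hys]
      simp only [ne_eq, List.map_eq_nil_iff]
      exact pvDD_ne_nil y ys
    rw [if_neg hAne, if_neg hBne]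
    rw [pvDD_map (ms.flatMap (pvWin n)) (fun j => l.getD j []) [] [] (by intro x hx; cases hx)]
    rw [hkey]
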